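-- pv_equiv track=rewrite | github.com/ubccr/xdmod-value-analytics | tools/viz_samples/sankey.py | get_publication_count_by_discipline
-- ===== SOURCE A (Python) =====
-- from collections import defaultdict, Counter
--
-- def get_publication_count_by_discipline(data):
--     r = defaultdict(set)
--     for d in data:
--         r[d['Discipline']].add(d['PubID'])
--     c = Counter()
--     for k,v in r.items():
--         c[k] = len(v)
--     return c
-- ===== SOURCE B (Python) =====
-- from collections import Counter
--
-- def get_publication_count_by_discipline(data):
--     # One pass: a flat set of (Discipline, PubID) pairs deduplicates;
--     # the Counter is incremented exactly when a new pair appears.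
--     c = Counter()
--     seen = set()
--     for d in data:
--         pair = (d['Discipline'], d['PubID'])
--         if pair not in seen:
--             seen.add(pair)
--             c[pair[0]] += 1
--     return c
-- ===== Notes on version B (the rewrite author's own statement) =====
-- stated objective: idiomatic
-- what changed: Replaced the two-pass dict-of-sets (group PubIDs per discipline, then a second loop taking len of each set) by a single pass that keeps a flat set of (Discipline, PubID) pairs and increments a Counter exactly when an unseen pair appears.
import Mathlib
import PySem

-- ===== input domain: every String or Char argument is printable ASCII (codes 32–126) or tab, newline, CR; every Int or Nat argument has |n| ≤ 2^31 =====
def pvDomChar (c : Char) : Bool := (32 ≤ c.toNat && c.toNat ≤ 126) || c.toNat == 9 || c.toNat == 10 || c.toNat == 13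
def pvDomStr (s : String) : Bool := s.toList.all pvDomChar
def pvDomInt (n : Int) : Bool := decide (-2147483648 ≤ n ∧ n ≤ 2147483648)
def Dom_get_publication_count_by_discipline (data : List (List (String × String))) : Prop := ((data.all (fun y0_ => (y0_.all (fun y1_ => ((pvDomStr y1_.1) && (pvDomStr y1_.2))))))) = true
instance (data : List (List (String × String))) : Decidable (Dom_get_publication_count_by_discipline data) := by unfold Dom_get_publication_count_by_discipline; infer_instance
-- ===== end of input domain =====

-- B counts distinct (Discipline, PubID) pairs in one pass with a flat seen-set and a Counter,
-- instead of A's dict-of-sets followed by a second len-taking loop; objective: idiomatic.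


-- d['Key'] on a row dict; total form via default "" — under Pre_ the key is always present, so this is exact.
def pvRowGet (d : List (String × String)) (k : String) : String :=
  (PySem.Dict.mk d).getD k ""

-- ===== PORT A =====
def get_publication_count_by_discipline (data : List (List (String × String))) : List (String × Int) :=
  let r : PySem.Dict String (PySem.Set String) :=
    data.foldl (fun r d =>
      r.insert (pvRowGet d "Discipline")
        (PySem.Set.add (r.getD (pvRowGet d "Discipline") PySem.Set.empty) (pvRowGet d "PubID")))
      PySem.Dict.empty
  (r.items.foldl (fun c kv => c.insert kv.1 (PySem.Set.len kv.2)) PySem.Dict.empty).items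

-- ===== PORT B =====
def get_publication_count_by_discipline_alt (data : List (List (String × String))) : List (String × Int) :=
  (data.foldl
    (fun (st : PySem.Dict String Int × PySem.Set (String × String)) d =>
      let pair := (pvRowGet d "Discipline", pvRowGet d "PubID")
      if PySem.Set.contains st.2 pair then st
      else (st.1.modify pair.1 0 (· + 1), PySem.Set.add st.2 pair))
    (PySem.Dict.empty, PySem.Set.empty)).1.items

-- ===== PRECONDITION & SPEC =====
-- Pre_: every row carries both keys; on a row missing 'Discipline' or 'PubID' the Python A raises KeyError.
def Pre_get_publication_count_by_discipline (data : List (List (String × String))) : Prop :=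
  ∀ d ∈ data, (PySem.Dict.mk d).contains "Discipline" = true ∧ (PySem.Dict.mk d).contains "PubID" = true
instance (data : List (List (String × String))) : Decidable (Pre_get_publication_count_by_discipline data) := by unfold Pre_get_publication_count_by_discipline; infer_instance
def pvWitness_get_publication_count_by_discipline : (List (List (String × String))) :=
  [[("Discipline", "math"), ("PubID", "p1")], [("Discipline", "math"), ("PubID", "p1")]]

def Spec_get_publication_count_by_discipline (data : List (List (String × String))) (out : List (String × Int)) : Prop := out = get_publication_count_by_discipline_alt data
instance (data : List (List (String × String))) (out : List (String × Int)) : Decidable (Spec_get_publication_count_by_discipline data out) := by unfold Spec_get_publication_count_by_discipline; infer_instance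

-- ===== CLAIM (what is proved, stated in full; the proofs are below) =====
def Claim_equal_get_publication_count_by_discipline : Prop := ∀ (data : List (List (String × String))), Dom_get_publication_count_by_discipline data → Pre_get_publication_count_by_discipline data → Spec_get_publication_count_by_discipline data (get_publication_count_by_discipline data)

-- ===== LEMMAS AND PROOFS =====

-- The Counter that B maintains, expressed from A's dict-of-sets: same keys, value = size of the set.
def pvMapLen (r : PySem.Dict String (PySem.Set String)) : PySem.Dict String Int :=
  PySem.Dict.mk (r.items.map (fun kv => (kv.1, PySem.Set.len kv.2)))

theorem pvMapLen_keys (r : PySem.Dict String (PySem.Set String)) :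
    (pvMapLen r).keys = r.keys := by
  simp [pvMapLen, PySem.Dict.keys]

theorem pvMapLen_contains (r : PySem.Dict String (PySem.Set String)) (k : String) :
    (pvMapLen r).contains k = r.contains k := by
  simp [PySem.Dict.contains_eq_decide_mem_keys, pvMapLen_keys]

-- Re-inserting the value already stored at k leaves the dict unchanged.
theorem insert_get?_self {κ ν : Type} [BEq κ] [LawfulBEq κ] (d : PySem.Dict κ ν) (k : κ) (v : ν)
    (hnd : d.keys.Nodup) (h : d.get? k = some v) : d.insert k v = d := by
  apply PySem.Dict.ext
  have hc : d.contains k = true := by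
    rw [PySem.Dict.contains_eq_isSome_get?, h]; rfl
  rw [PySem.Dict.items_insert_of_contains d v hc]
  have hmem : (k, v) ∈ d.items := PySem.Dict.mem_items_of_get?_eq_some _ h
  -- every item with key k equals (k, v) since keys are unique
  conv_rhs => rw [← List.map_id d.items]
  apply List.map_congr_left
  intro p hp
  by_cases hk : p.1 = k
  · have : p = (k, v) := by
      have h2 : d.get? p.1 = some p.2 := PySem.Dict.get?_of_mem_items _ hp hnd
      rw [hk, h] at h2
      cases p; simp at hk ⊢; exact ⟨hk, by injection h2 with h3; exact h3.symm⟩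
    simp [this]
  · simp [hk]

-- One step of the two loops preserves the correspondence.
theorem pv_step (r : PySem.Dict String (PySem.Set String)) (seen : PySem.Set (String × String))
    (k p : String)
    (hseen : ∀ q : String × String, q ∈ seen ↔ ∃ s, r.get? q.1 = some s ∧ q.2 ∈ s)
    (hnd : r.keys.Nodup) :
    (let pair := (k, p)
     if PySem.Set.contains seen pair then ((pvMapLen r, seen) : PySem.Dict String Int × PySem.Set (String × String))
     else ((pvMapLen r).modify pair.1 0 (· + 1), PySem.Set.add seen pair))
    = (pvMapLen (r.insert k (PySem.Set.add (r.getD k PySem.Set.empty) p)),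
       -- canonical form of the new seen-set, used by pv_inv below
       if PySem.Set.contains seen (k, p) then seen else PySem.Set.add seen (k, p)) := by
  simp only
  by_cases hmem : ((k, p) : String × String) ∈ seen
  · -- pair already seen: A's add is a no-op, its insert re-inserts the same set
    have hcs : PySem.Set.contains seen (k, p) = true := (PySem.Set.contains_iff _ _).2 hmem
    obtain ⟨s, hks, hps⟩ := (hseen (k, p)).1 hmem
    have hgd : r.getD k PySem.Set.empty = s := PySem.Dict.getD_of_get?_eq_some _ _ hks
    have hadd : PySem.Set.add s p = s := PySem.Set.add_of_mem hps
    simp only [hcs, if_true]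
    rw [hgd, hadd, insert_get?_self r k s hnd hks]
  · have hcs : PySem.Set.contains seen (k, p) = false := by
      cases h : PySem.Set.contains seen (k, p)
      · rfl
      · exact absurd ((PySem.Set.contains_iff _ _).1 h) hmem
    simp only [hcs, if_false, Bool.false_eq_true, Prod.mk.injEq, and_true]
    -- need: (pvMapLen r).modify k 0 (+1) = pvMapLen (r.insert k ((r.getD k ∅).add p))
    show (pvMapLen r).insert k ((pvMapLen r).getD k 0 + 1) = _
    cases hg : r.get? k with
    | none =>
      have hc : r.contains k = false := by
        rw [PySem.Dict.contains_eq_isSome_get?, hg]; rfl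
      have hc' : (pvMapLen r).contains k = false := by rw [pvMapLen_contains, hc]
      have hgd : r.getD k PySem.Set.empty = PySem.Set.empty :=
        PySem.Dict.getD_of_get?_eq_none _ _ hg
      have hadd : PySem.Set.add PySem.Set.empty p = [p] := rfl
      apply PySem.Dict.ext
      rw [PySem.Dict.items_insert_of_not_contains _ _ hc']
      have : (pvMapLen r).getD k 0 = 0 := PySem.Dict.getD_of_not_contains _ _ hc'
      rw [this]
      simp only [pvMapLen]
      rw [PySem.Dict.items_insert_of_not_contains _ _ hc, hgd, hadd]
      simp [PySem.Set.len]
    | some s =>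
      have hc : r.contains k = true := by
        rw [PySem.Dict.contains_eq_isSome_get?, hg]; rfl
      have hc' : (pvMapLen r).contains k = true := by rw [pvMapLen_contains, hc]
      have hgd : r.getD k PySem.Set.empty = s := PySem.Dict.getD_of_get?_eq_some _ _ hg
      have hps : p ∉ s := fun hp => hmem ((hseen (k, p)).2 ⟨s, hg, hp⟩)
      have hadd : PySem.Set.add s p = s ++ [p] := PySem.Set.add_of_not_mem hps
      have hlen : (pvMapLen r).getD k 0 = PySem.Set.len s := by
        have : (k, PySem.Set.len s) ∈ (pvMapLen r).items := by
          simp only [pvMapLen]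
          exact List.mem_map.2 ⟨(k, s), PySem.Dict.mem_items_of_get?_eq_some _ hg, rfl⟩
        exact PySem.Dict.getD_of_mem_items _ this (by rw [pvMapLen_keys]; exact hnd) 0
      apply PySem.Dict.ext
      rw [PySem.Dict.items_insert_of_contains _ _ hc', hlen]
      simp only [pvMapLen]
      rw [PySem.Dict.items_insert_of_contains _ _ hc, hgd, hadd]
      rw [List.map_map, List.map_map]
      apply List.map_congr_left
      intro q hq
      by_cases hk : (q.1 == k) = true
      · simp [Function.comp, hk, PySem.Set.len]
      · simp [Function.comp, hk]

-- Loop invariant: folding B's step over (pvMapLen r, seen) tracks folding A's step over r.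
theorem pv_inv (data : List (List (String × String)))
    (r : PySem.Dict String (PySem.Set String)) (seen : PySem.Set (String × String))
    (hseen : ∀ q : String × String, q ∈ seen ↔ ∃ s, r.get? q.1 = some s ∧ q.2 ∈ s)
    (hnd : r.keys.Nodup) :
    (data.foldl
      (fun (st : PySem.Dict String Int × PySem.Set (String × String)) d =>
        let pair := (pvRowGet d "Discipline", pvRowGet d "PubID")
        if PySem.Set.contains st.2 pair then st
        else (st.1.modify pair.1 0 (· + 1), PySem.Set.add st.2 pair))
      (pvMapLen r, seen)).1
    = pvMapLen (data.foldl (fun r d =>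
        r.insert (pvRowGet d "Discipline")
          (PySem.Set.add (r.getD (pvRowGet d "Discipline") PySem.Set.empty) (pvRowGet d "PubID"))) r) := by
  induction data generalizing r seen with
  | nil => rfl
  | cons d rest ih =>
    simp only [List.foldl_cons]
    set k := pvRowGet d "Discipline"
    set p := pvRowGet d "PubID"
    have hstep := pv_step r seen k p hseen hnd
    simp only at hstep
    rw [hstep]
    set r' := r.insert k (PySem.Set.add (r.getD k PySem.Set.empty) p) with hr'
    apply ih
    · intro q
      by_cases hmem : ((k, p) : String × String) ∈ seen
      · have hcs : PySem.Set.contains seen (k, p) = true := (PySem.Set.contains_iff _ _).2 hmem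
        simp only [hcs, if_true]
        rw [hseen q]
        obtain ⟨s, hks, hps⟩ := (hseen (k, p)).1 hmem
        have hgd : r.getD k PySem.Set.empty = s := PySem.Dict.getD_of_get?_eq_some _ _ hks
        have hadd : PySem.Set.add s p = s := PySem.Set.add_of_mem hps
        rw [hr', hgd, hadd, insert_get?_self r k s hnd hks]
      · have hcs : PySem.Set.contains seen (k, p) = false := by
          cases h : PySem.Set.contains seen (k, p)
          · rfl
          · exact absurd ((PySem.Set.contains_iff _ _).1 h) hmem
        simp only [hcs, if_false, Bool.false_eq_true]
        rw [PySem.Set.mem_add]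
        constructor
        · rintro (hq | rfl)
          · obtain ⟨s, hks, hqs⟩ := (hseen q).1 hq
            by_cases hk : q.1 = k
            · refine ⟨PySem.Set.add (r.getD k PySem.Set.empty) p, ?_, ?_⟩
              · rw [hr', PySem.Dict.get?_insert, if_pos hk]
              · rw [hk] at hks
                rw [PySem.Dict.getD_of_get?_eq_some _ _ hks, PySem.Set.mem_add]
                exact Or.inl hqs
            · exact ⟨s, by rw [hr', PySem.Dict.get?_insert, if_neg hk]; exact hks, hqs⟩
          · refine ⟨PySem.Set.add (r.getD k PySem.Set.empty) p, ?_, ?_⟩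
            · rw [hr', PySem.Dict.get?_insert, if_pos rfl]
            · rw [PySem.Set.mem_add]; exact Or.inr rfl
        · rintro ⟨s, hqs, hqin⟩
          by_cases hk : q.1 = k
          · rw [hr', PySem.Dict.get?_insert, if_pos hk] at hqs
            injection hqs with hqs
            rw [← hqs, PySem.Set.mem_add] at hqin
            rcases hqin with hqin | hq2
            · left
              apply (hseen q).2
              cases hg : r.get? k with
              | none =>
                rw [PySem.Dict.getD_of_get?_eq_none _ _ hg] at hqin
                exact absurd hqin List.not_mem_nil
              | some s0 =>
                exact ⟨s0, by rw [hk]; exact hg,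
                  by rwa [PySem.Dict.getD_of_get?_eq_some _ _ hg] at hqin⟩
            · right; exact Prod.ext_iff.2 ⟨hk, hq2⟩
          · left
            apply (hseen q).2
            exact ⟨s, by rw [hr', PySem.Dict.get?_insert, if_neg hk] at hqs; exact hqs, hqin⟩
    · exact PySem.Dict.nodup_keys_insert _ _ _ hnd

-- A's second loop (Counter(); for k,v in r.items(): c[k]=len(v)) produces exactly pvMapLen r.
theorem pv_second_loop (r : PySem.Dict String (PySem.Set String)) (hnd : r.keys.Nodup) :
    (r.items.foldl (fun c kv => c.insert kv.1 (PySem.Set.len kv.2)) PySem.Dict.empty).items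
    = (pvMapLen r).items := by
  rw [PySem.Dict.items_foldl_insert_fresh r.items (fun kv => kv.1) (fun kv => PySem.Set.len kv.2)
      PySem.Dict.empty (fun a _ => PySem.Dict.contains_empty _) (by exact hnd)]
  simp [pvMapLen, PySem.Dict.empty]

-- ===== VERDICT (by name: the statement is the Claim_ definition above) =====
theorem get_publication_count_by_discipline_spec : Claim_equal_get_publication_count_by_discipline := by
  intro data _ _
  unfold Spec_get_publication_count_by_discipline
  unfold get_publication_count_by_discipline get_publication_count_by_discipline_alt
  simp only
  have hinv := pv_inv data PySem.Dict.empty PySem.Set.empty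
    (by intro q; constructor
        · intro h; exact absurd h (List.not_mem_nil)
        · rintro ⟨s, hs, _⟩; rw [PySem.Dict.get?_empty] at hs; exact absurd hs (by simp))
    PySem.Dict.nodup_keys_empty
  have hnd : (data.foldl (fun r d =>
      r.insert (pvRowGet d "Discipline")
        (PySem.Set.add (r.getD (pvRowGet d "Discipline") PySem.Set.empty) (pvRowGet d "PubID")))
      PySem.Dict.empty).keys.Nodup := by
    exact PySem.Dict.nodup_keys_foldl_insert_key data (fun d => pvRowGet d "Discipline") _ _
      PySem.Dict.nodup_keys_empty
  rw [pv_second_loop _ hnd]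
  have : pvMapLen PySem.Dict.empty = PySem.Dict.empty := rfl
  rw [← this, hinv]
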